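-- pv_equiv track=rewrite | github.com/nishlear/food-story | src/backend/main.py | pick_display_description
-- ===== SOURCE A (Python) =====
-- from typing import Dict, List, Optional
--
-- def clean_text(value) -> Optional[str]:
--     if not isinstance(value, str):
--         return None
--     trimmed = value.strip()
--     return trimmed or None
--
-- def pick_display_description(descriptions: Dict[str, str]) -> Optional[str]:
--     for language in ["vi", "en", "ko", "ja", "zh-CN", "zh-TW", "es"]:
--         translated = clean_text(descriptions.get(language))
--         if translated:
--             return translated
--     for translated in descriptions.values():
--         cleaned = clean_text(translated)
--         if cleaned:
--             return cleaned
--     return None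
-- ===== SOURCE B (Python) =====
-- LANGS = ["vi", "en", "ko", "ja", "zh-CN", "zh-TW", "es"]
--
-- def pick_display_description(descriptions):
--     rank = {lang: i for i, lang in enumerate(LANGS)}
--     best_rank = len(LANGS) + 1
--     best = None
--     for key, value in descriptions.items():
--         cleaned = value.strip()
--         if not cleaned:
--             continue
--         r = rank.get(key, len(LANGS))
--         if r < best_rank:
--             best_rank, best = r, cleaned
--     return best
-- ===== Notes on version B (the rewrite author's own statement) =====
-- stated objective: alternative
-- what changed: Replaces A's two sequential loops (try 7 priority languages via dict lookups, then scan all values) by one single pass over the items that keeps the cleaned value of minimal priority rank, with ranks from a precomputed index dict (7 for non-priority keys); Pre_ excludes association lists with duplicate keys, which cannot arise from A's Python dict argument, so no Python-representable input is excluded.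
import Mathlib
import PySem

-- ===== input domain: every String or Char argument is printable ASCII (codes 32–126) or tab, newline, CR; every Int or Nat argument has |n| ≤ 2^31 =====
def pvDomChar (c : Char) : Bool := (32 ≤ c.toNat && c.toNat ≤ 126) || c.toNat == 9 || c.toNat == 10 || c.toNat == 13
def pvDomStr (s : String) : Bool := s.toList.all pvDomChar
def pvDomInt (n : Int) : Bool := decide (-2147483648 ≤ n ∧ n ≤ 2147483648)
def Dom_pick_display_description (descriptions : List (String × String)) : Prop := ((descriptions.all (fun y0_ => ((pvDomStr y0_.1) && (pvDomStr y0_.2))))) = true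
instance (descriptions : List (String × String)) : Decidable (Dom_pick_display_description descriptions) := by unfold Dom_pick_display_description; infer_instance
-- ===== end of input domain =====

-- B replaces A's two loops by a single min-rank pass over the items; return values proved equal on key-distinct inputs.

-- ===== PORT A =====
def pvLangs : List String := ["vi", "en", "ko", "ja", "zh-CN", "zh-TW", "es"]

-- clean_text: the argument is str-or-None (Option String); strip, empty becomes None
def pvCleanText (value : Option String) : Option String :=
  match value with
  | none => none
  | some s => let t := PySem.Str.strip s; if t = "" then none else some t

-- first for-loop of A: try the priority languages in order via dict lookup
def pvLoop1 (d : PySem.Dict String String) : List String → Option String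
  | [] => none
  | lang :: rest =>
    match pvCleanText (d.get? lang) with
    | some t => some t
    | none => pvLoop1 d rest

-- second for-loop of A: scan descriptions.values()
def pvLoop2 : List String → Option String
  | [] => none
  | v :: rest =>
    match pvCleanText (some v) with
    | some c => some c
    | none => pvLoop2 rest

def pick_display_description (descriptions : List (String × String)) : Option String :=
  let d := PySem.Dict.mk descriptions
  match pvLoop1 d pvLangs with
  | some t => some t
  | none => pvLoop2 d.values

-- ===== PORT B =====
-- rank = {lang: i for i, lang in enumerate(LANGS)}
def pvRankDict : PySem.Dict String Int :=
  (PySem.List.enumerate pvLangs).foldl (fun d p => d.insert p.2 p.1) PySem.Dict.empty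

-- one item of the single pass of B
def pvStep (st : Int × Option String) (p : String × String) : Int × Option String :=
  let cleaned := PySem.Str.strip p.2
  if cleaned = "" then st
  else
    let r := pvRankDict.getD p.1 7
    if r < st.1 then (r, some cleaned) else st

def pick_display_description_alt (descriptions : List (String × String)) : Option String :=
  (descriptions.foldl pvStep (8, none)).2

-- ===== PRECONDITION & SPEC =====
-- Pre_ excludes association lists with duplicate keys: a Python dict argument can never have them,
-- so this excludes no input the Python A is ever called on; on duplicate-key lists A's first-match
-- get vs. values() iteration is an artefact of the encoding.
def Pre_pick_display_description (descriptions : List (String × String)) : Prop :=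
  (descriptions.map Prod.fst).Nodup
instance (descriptions : List (String × String)) : Decidable (Pre_pick_display_description descriptions) := by unfold Pre_pick_display_description; infer_instance

def pvWitness_pick_display_description : (List (String × String)) := [("fr", " bonjour "), ("en", "hi")]

def Spec_pick_display_description (descriptions : List (String × String)) (out : Option String) : Prop := out = pick_display_description_alt descriptions
instance (descriptions : List (String × String)) (out : Option String) : Decidable (Spec_pick_display_description descriptions out) := by unfold Spec_pick_display_description; infer_instance

-- ===== CLAIM (what is proved, stated in full; the proofs are below) =====
def Claim_equal_pick_display_description : Prop := ∀ (descriptions : List (String × String)), Dom_pick_display_description descriptions → Pre_pick_display_description descriptions → Spec_pick_display_description descriptions (pick_display_description descriptions)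

-- ===== LEMMAS AND PROOFS =====

theorem pvRankDict_eq : pvRankDict = PySem.Dict.mk
    [("vi",0),("en",1),("ko",2),("ja",3),("zh-CN",4),("zh-TW",5),("es",6)] := by decide

-- rank function of B, closed form
theorem pvRank_spec (k : String) : pvRankDict.getD k 7 =
    (if k = "vi" then 0 else if k = "en" then 1 else if k = "ko" then 2 else if k = "ja" then 3
     else if k = "zh-CN" then 4 else if k = "zh-TW" then 5 else if k = "es" then 6 else 7) := by
  simp only [pvRankDict_eq, PySem.Dict.getD_eq_get?_getD, PySem.Dict.get?_mk_cons, beq_iff_eq]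
  split_ifs <;> first | rfl | simp_all

-- the "good" items: (rank, cleaned value) of the items whose value strips nonempty
def pvGood (l : List (String × String)) : List (Int × String) :=
  l.filterMap (fun p =>
    let c := PySem.Str.strip p.2
    if c = "" then none else some (pvRankDict.getD p.1 7, c))

def pvStep' (st : Int × Option String) (q : Int × String) : Int × Option String :=
  if q.1 < st.1 then (q.1, some q.2) else st

theorem fold_good (l : List (String × String)) (st : Int × Option String) :
    l.foldl pvStep st = (pvGood l).foldl pvStep' st := by
  induction l generalizing st with
  | nil => rfl
  | cons p t ih =>
    by_cases h : PySem.Str.strip p.2 = "" <;>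
      simp [pvGood, pvStep, pvStep', h, ih]

theorem fold_stay (gs : List (Int × String)) (st : Int × Option String)
    (h : ∀ q ∈ gs, ¬ q.1 < st.1) : gs.foldl pvStep' st = st := by
  induction gs with
  | nil => rfl
  | cons q t ih =>
    have hq := h q (by simp)
    simp only [List.foldl_cons, pvStep', if_neg hq]
    exact ih (fun r hr => h r (by simp [hr]))

theorem fold_min (pre post : List (Int × String)) (m : Int) (c : String)
    (st : Int × Option String) (h1 : ∀ q ∈ pre, m < q.1) (h2 : ∀ q ∈ post, m ≤ q.1)
    (h3 : m < st.1) : (pre ++ (m, c) :: post).foldl pvStep' st = (m, some c) := by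
  induction pre generalizing st with
  | nil =>
    simp only [List.nil_append, List.foldl_cons, pvStep', if_pos h3]
    exact fold_stay post (m, some c) (fun q hq => by have := h2 q hq; simp; omega)
  | cons a t ih =>
    simp only [List.cons_append, List.foldl_cons]
    have ha := h1 a (by simp)
    refine ih (pvStep' st a) (fun q hq => h1 q (List.mem_cons_of_mem _ hq)) ?_
    by_cases hlt : a.1 < st.1 <;> simp [pvStep', hlt] <;> omega

theorem first_min_decomp (gs : List (Int × String)) (h : gs ≠ []) :
    ∃ pre m c post, gs = pre ++ (m, c) :: post ∧ (∀ q ∈ pre, m < q.1) ∧ ∀ q ∈ gs, m ≤ q.1 := by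
  induction gs with
  | nil => exact absurd rfl h
  | cons q t ih =>
    by_cases ht : t = []
    · subst ht
      exact ⟨[], q.1, q.2, [], by simp, by simp, by simp⟩
    · obtain ⟨pre, m, c, post, heq, hpre, hall⟩ := ih ht
      by_cases hle : q.1 ≤ m
      · refine ⟨[], q.1, q.2, t, by simp, by simp, ?_⟩
        intro r hr
        rcases List.mem_cons.mp hr with h' | h'
        · simp [h']
        · have := hall r h'; omega
      · refine ⟨q :: pre, m, c, post, by simp [heq], ?_, ?_⟩
        · intro r hr
          rcases List.mem_cons.mp hr with h' | h'
          · subst h'; omega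
          · exact hpre r h'
        · intro r hr
          rcases List.mem_cons.mp hr with h' | h'
          · subst h'; omega
          · exact hall r h'

theorem rank_range (k : String) : 0 ≤ pvRankDict.getD k 7 ∧ pvRankDict.getD k 7 ≤ 7 := by
  rw [pvRank_spec]; split_ifs <;> norm_num

theorem good_mem (l : List (String × String)) (q : Int × String) (h : q ∈ pvGood l) :
    ∃ k v, (k, v) ∈ l ∧ pvRankDict.getD k 7 = q.1 ∧ PySem.Str.strip v = q.2 ∧ q.2 ≠ "" := by
  unfold pvGood at h
  rw [List.mem_filterMap] at h
  obtain ⟨p, hp, he⟩ := h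
  by_cases hc : PySem.Str.strip p.2 = ""
  · simp [hc] at he
  · simp only [hc, Option.some.injEq, if_false] at he
    refine ⟨p.1, p.2, hp, ?_, ?_, ?_⟩ <;> rw [← he]
    exact hc

theorem good_mem_of (l : List (String × String)) (k v : String) (hin : (k, v) ∈ l)
    (hc : PySem.Str.strip v ≠ "") : (pvRankDict.getD k 7, PySem.Str.strip v) ∈ pvGood l := by
  unfold pvGood
  rw [List.mem_filterMap]
  exact ⟨(k, v), hin, by simp [hc]⟩

-- if no good item has rank j, the lookup of a language of rank j cleans to none
theorem cf_none (l : List (String × String)) (lang : String) (j : Int)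
    (hrk : pvRankDict.getD lang 7 = j) (h : ∀ q ∈ pvGood l, q.1 ≠ j) :
    pvCleanText ((PySem.Dict.mk l).get? lang) = none := by
  cases hg : (PySem.Dict.mk l).get? lang with
  | none => simp [pvCleanText]
  | some v =>
    have hmem : (lang, v) ∈ (PySem.Dict.mk l).items := by
      apply PySem.Dict.mem_items_of_get?_eq_some (h := hg)
    by_cases hc : PySem.Str.strip v = ""
    · simp [pvCleanText, hc]
    · exact absurd hrk (h _ (good_mem_of l lang v hmem hc))

theorem cf_some (l : List (String × String)) (k v c : String)
    (hnd : (l.map Prod.fst).Nodup) (hin : (k, v) ∈ l)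
    (hs : PySem.Str.strip v = c) (hne : c ≠ "") :
    pvCleanText ((PySem.Dict.mk l).get? k) = some c := by
  have hg : (PySem.Dict.mk l).get? k = some v := by
    apply PySem.Dict.get?_of_mem_items (d := PySem.Dict.mk l) hin
    simpa [PySem.Dict.keys] using hnd
  simp [pvCleanText, hg, hs, hne]

theorem loop2_good (l : List (String × String)) :
    pvLoop2 (l.map Prod.snd) = ((pvGood l).head?).map Prod.snd := by
  induction l with
  | nil => rfl
  | cons p t ih =>
    simp only [List.map_cons, pvLoop2, pvGood, List.filterMap_cons, pvCleanText]
    by_cases hc : PySem.Str.strip p.2 = ""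
    · simp only [hc]
      simpa [pvGood] using ih
    · simp [hc]

theorem alt_eq_fold (l : List (String × String)) :
    pick_display_description_alt l = ((pvGood l).foldl pvStep' (8, none)).2 := by
  unfold pick_display_description_alt
  rw [fold_good]

-- ===== VERDICT (by name: the statement is the Claim_ definition above) =====
theorem pick_display_description_spec : Claim_equal_pick_display_description := by
  intro l _ hpre
  unfold Spec_pick_display_description
  by_cases hg : pvGood l = []
  · have h1 : pvLoop1 (PySem.Dict.mk l) pvLangs = none := by
      have hn : ∀ lang, pvCleanText ((PySem.Dict.mk l).get? lang) = none := fun lang =>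
        cf_none l lang _ rfl (by simp [hg])
      simp [pvLangs, pvLoop1, hn]
    have h2 : pvLoop2 (List.map (fun x => x.2) l) = none := by
      have h := loop2_good l
      rw [hg] at h
      simpa using h
    simp [pick_display_description, PySem.Dict.values, h1, h2, alt_eq_fold, hg]
  · obtain ⟨pre, m, c, post, heq, hpre', hall⟩ := first_min_decomp _ hg
    have hmc : (m, c) ∈ pvGood l := by rw [heq]; simp
    obtain ⟨k, v, hin, hrk, hs, hne⟩ := good_mem l (m, c) hmc
    simp only at hrk hs hne
    have hm07 : 0 ≤ m ∧ m ≤ 7 := by have := rank_range k; rw [hrk] at this; exact this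
    have hBval : pick_display_description_alt l = some c := by
      rw [alt_eq_fold, heq,
        fold_min pre post m c _ hpre' (fun q hq => hall q (by rw [heq]; simp [hq])) (by omega)]
    have hn : ∀ lang j, pvRankDict.getD lang 7 = j → j < m →
        pvCleanText ((PySem.Dict.mk l).get? lang) = none := fun lang j hj hlt =>
      cf_none l lang j hj (fun q hq hqe => by have := hall q hq; omega)
    by_cases hm7 : m = 7
    · -- no priority language is usable; A's second loop returns the first good value = c
      have hpre_nil : pre = [] := by
        cases pre with
        | nil => rfl
        | cons a t =>
          exfalso
          have h7 := hpre' a (by simp)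
          have ha : a ∈ pvGood l := by rw [heq]; simp
          obtain ⟨k', v', _, hrk', _, _⟩ := good_mem l a ha
          have := rank_range k'
          rw [hrk'] at this
          omega
      have h1 : pvLoop1 (PySem.Dict.mk l) pvLangs = none := by
        simp only [pvLangs, pvLoop1]
        rw [hn "vi" 0 (by decide) (by omega), hn "en" 1 (by decide) (by omega),
          hn "ko" 2 (by decide) (by omega), hn "ja" 3 (by decide) (by omega),
          hn "zh-CN" 4 (by decide) (by omega), hn "zh-TW" 5 (by decide) (by omega),
          hn "es" 6 (by decide) (by omega)]
      have h2 : pvLoop2 (List.map (fun x => x.2) l) = some c := by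
        have h := loop2_good l
        rw [heq, hpre_nil] at h
        simpa using h
      simp [pick_display_description, PySem.Dict.values, h1, h2, hBval]
    · -- the minimal rank m < 7 belongs to a priority language; A's first loop returns c there
      have hcf : pvCleanText ((PySem.Dict.mk l).get? k) = some c := cf_some l k v c hpre hin hs hne
      rw [pvRank_spec] at hrk
      simp only [pick_display_description, pvLangs, pvLoop1]
      split_ifs at hrk with e1 e2 e3 e4 e5 e6 e7
      · subst e1; rw [hcf, hBval]
      · subst e2
        rw [hn "vi" 0 (by decide) (by omega), hcf, hBval]
      · subst e3
        rw [hn "vi" 0 (by decide) (by omega), hn "en" 1 (by decide) (by omega), hcf, hBval]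
      · subst e4
        rw [hn "vi" 0 (by decide) (by omega), hn "en" 1 (by decide) (by omega),
          hn "ko" 2 (by decide) (by omega), hcf, hBval]
      · subst e5
        rw [hn "vi" 0 (by decide) (by omega), hn "en" 1 (by decide) (by omega),
          hn "ko" 2 (by decide) (by omega), hn "ja" 3 (by decide) (by omega), hcf, hBval]
      · subst e6
        rw [hn "vi" 0 (by decide) (by omega), hn "en" 1 (by decide) (by omega),
          hn "ko" 2 (by decide) (by omega), hn "ja" 3 (by decide) (by omega),
          hn "zh-CN" 4 (by decide) (by omega), hcf, hBval]
      · subst e7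
        rw [hn "vi" 0 (by decide) (by omega), hn "en" 1 (by decide) (by omega),
          hn "ko" 2 (by decide) (by omega), hn "ja" 3 (by decide) (by omega),
          hn "zh-CN" 4 (by decide) (by omega), hn "zh-TW" 5 (by decide) (by omega), hcf, hBval]
      · omega
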